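-- pv_equiv track=rewrite | github.com/Livy456/MIT-6.009-Code | Pset8/autocomplete.py | all_single_character_replace
-- ===== SOURCE A (Python) =====
-- def all_single_character_replace(tree, prefix, valid_words_set, autocomplete_words):
--     """
--     Generates a list of all possible prefixes that has any of
--     the letters replaced by any of the letters in the alphabet
--     """
--     all_prefixes = set()
--
--     # iterates through each letter in prefix
--     for i in range(len(prefix)):
--
--         # goes through each letter in alphabet
--         for alphabet_int in range(97, 123):
--             char = chr(alphabet_int)
--
--             # replace one of the letters in prefix
--             # with any letter in alphabet
--             new_prefix = prefix[0:i] + char + prefix[i+1:]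
--
--             # checks if the new edit is in prefix tree
--             if ((new_prefix in valid_words_set) and (autocomplete_words is not None)
--                 and (new_prefix not in autocomplete_words)):
--                 all_prefixes.add((new_prefix, tree[new_prefix]))
--
--     return all_prefixes
-- ===== SOURCE B (Python) =====
-- def all_single_character_replace(tree, prefix, valid_words_set, autocomplete_words):
--     """
--     Generates a list of all possible prefixes that has any of
--     the letters replaced by any of the letters in the alphabet
--     """
--     results = set()
--     if autocomplete_words is None:
--         return results
--     n = len(prefix)
--
--     # One pass over the valid words: for each position of prefix, collect the
--     # characters whose substitution there yields a usable valid word.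
--     found = [set() for _ in range(n)]
--     for w in valid_words_set:
--         if len(w) != n or w in autocomplete_words:
--             continue
--         if w == prefix:
--             # the prefix is its own substitution at every position
--             for i in range(n):
--                 found[i].add(prefix[i])
--         else:
--             diffs = [i for i in range(n) if w[i] != prefix[i]]
--             if len(diffs) == 1:
--                 found[diffs[0]].add(w[diffs[0]])
--
--     # Materialize: only substitutions by a letter of the alphabet count.
--     for i, chars in enumerate(found):
--         for c in "abcdefghijklmnopqrstuvwxyz":
--             if c in chars:
--                 new_prefix = prefix[:i] + c + prefix[i+1:]
--                 results.add((new_prefix, tree[new_prefix]))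
--     return results
-- ===== Notes on version B (the rewrite author's own statement) =====
-- stated objective: faster
-- what changed: Instead of enumerating all 26*len(prefix) single-letter edits of prefix and testing each one for membership, B makes one classification pass over valid_words_set recording, for each position of prefix, the replacement characters that yield a usable valid word, and then materializes only the recorded alphabet-letter substitutions.
import Mathlib
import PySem

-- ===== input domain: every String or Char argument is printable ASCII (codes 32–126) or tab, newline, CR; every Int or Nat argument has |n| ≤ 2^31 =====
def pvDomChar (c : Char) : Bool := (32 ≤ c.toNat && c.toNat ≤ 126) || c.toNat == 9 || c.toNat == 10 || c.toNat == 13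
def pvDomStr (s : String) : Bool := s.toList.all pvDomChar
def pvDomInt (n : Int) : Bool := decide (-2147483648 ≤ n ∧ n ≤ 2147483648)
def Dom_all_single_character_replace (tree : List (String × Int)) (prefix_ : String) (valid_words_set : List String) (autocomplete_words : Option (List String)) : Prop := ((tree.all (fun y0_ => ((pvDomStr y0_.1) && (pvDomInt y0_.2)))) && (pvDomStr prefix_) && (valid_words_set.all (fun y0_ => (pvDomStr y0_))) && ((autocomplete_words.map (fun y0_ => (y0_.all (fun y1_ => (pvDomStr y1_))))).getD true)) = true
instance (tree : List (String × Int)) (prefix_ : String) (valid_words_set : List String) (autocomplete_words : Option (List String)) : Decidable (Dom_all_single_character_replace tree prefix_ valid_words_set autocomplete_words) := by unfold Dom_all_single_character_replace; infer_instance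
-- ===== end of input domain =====

-- Header: B replaces A's 26·len(prefix) candidate enumeration (each with a membership test) by one
-- classification pass over valid_words_set that records, per position, the usable replacement letters.

-- ===== PORT A =====
def all_single_character_replace (tree : List (String × Int)) (prefix_ : String) (valid_words_set : List String) (autocomplete_words : Option (List String)) : List (String × Int) :=
  -- all_prefixes = set()
  -- for i in range(len(prefix)): for alphabet_int in range(97, 123): ...
  (PySem.List.pyRange 0 (PySem.Str.len prefix_) 1).foldl (fun all_prefixes i =>
    (PySem.List.pyRange 97 123 1).foldl (fun all_prefixes alphabet_int =>
      -- char = chr(alphabet_int)  (exact here: 97 ≤ alphabet_int ≤ 122)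
      let char : Char := Char.ofNat alphabet_int.toNat
      -- new_prefix = prefix[0:i] + char + prefix[i+1:]  (string concatenation ported as List Char append; exact)
      let new_prefix : String := String.ofList
        (PySem.Chars.slice prefix_.toList (some 0) (some i) ++ [char] ++ PySem.Chars.slice prefix_.toList (some (i + 1)) none)
      if new_prefix ∈ valid_words_set ∧ autocomplete_words ≠ none ∧ new_prefix ∉ autocomplete_words.getD [] then
        -- all_prefixes.add((new_prefix, tree[new_prefix])); total form of tree[new_prefix] under Pre_
        PySem.Set.add all_prefixes (new_prefix, PySem.Dict.getD (PySem.Dict.mk tree) new_prefix 0)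
      else all_prefixes) all_prefixes) []

-- ===== PORT B =====
-- body of Source B's classification loop over the valid words (indexing w[i]/prefix[i] ported as
-- PySem.List.pyGetD on .toList — exact: every index used is in range)
def pvFoundStep (prefix_ : String) (ac : List String) (n : Int) (found : List (PySem.Set Char)) (w : String) : List (PySem.Set Char) :=
  -- if len(w) != n or w in autocomplete_words: continue
  if PySem.Str.len w ≠ n ∨ w ∈ ac then found
  else if w = prefix_ then
    -- for i in range(n): found[i].add(prefix[i])
    (PySem.List.pyRange 0 n 1).foldl (fun fd i =>
      PySem.List.pySetD fd i (PySem.Set.add (PySem.List.pyGetD fd i PySem.Set.empty) (PySem.List.pyGetD prefix_.toList i ' '))) found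
  else
    -- diffs = [i for i in range(n) if w[i] != prefix[i]]
    let diffs := (PySem.List.pyRange 0 n 1).filter (fun i => PySem.List.pyGetD w.toList i ' ' != PySem.List.pyGetD prefix_.toList i ' ')
    if diffs.length = 1 then
      let d := PySem.List.pyGetD diffs 0 0
      -- found[diffs[0]].add(w[diffs[0]])
      PySem.List.pySetD found d (PySem.Set.add (PySem.List.pyGetD found d PySem.Set.empty) (PySem.List.pyGetD w.toList d ' '))
    else found

def all_single_character_replace_alt (tree : List (String × Int)) (prefix_ : String) (valid_words_set : List String) (autocomplete_words : Option (List String)) : List (String × Int) :=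
  match autocomplete_words with
  | none => PySem.Set.empty
  | some ac =>
    let n := PySem.Str.len prefix_
    -- found = [set() for _ in range(n)]; one pass over the valid words
    let found := valid_words_set.foldl (pvFoundStep prefix_ ac n)
      ((PySem.List.pyRange 0 n 1).map (fun _ => PySem.Set.empty))
    -- for i, chars in enumerate(found): for c in "abcdefghijklmnopqrstuvwxyz": if c in chars: ...
    (PySem.List.enumerate found 0).foldl (fun results p =>
      "abcdefghijklmnopqrstuvwxyz".toList.foldl (fun results c =>
        if PySem.Set.contains p.2 c then
          -- new_prefix = prefix[:i] + c + prefix[i+1:]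
          let new_prefix : String := String.ofList
            (PySem.Chars.slice prefix_.toList none (some p.1) ++ [c] ++ PySem.Chars.slice prefix_.toList (some (p.1 + 1)) none)
          PySem.Set.add results (new_prefix, PySem.Dict.getD (PySem.Dict.mk tree) new_prefix 0)
        else results) results) PySem.Set.empty

-- ===== PRECONDITION & SPEC =====
-- Pre_ excludes exactly the inputs on which Python A raises KeyError: a word of valid_words_set that is a
-- single-a-z-letter replacement of prefix, is not suppressed by autocomplete_words, but is not a key of tree.
def Pre_all_single_character_replace (tree : List (String × Int)) (prefix_ : String) (valid_words_set : List String) (autocomplete_words : Option (List String)) : Prop :=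
  ∀ w ∈ valid_words_set, autocomplete_words ≠ none → w ∉ autocomplete_words.getD [] →
    (w.toList.length = prefix_.toList.length ∧
      ∃ i < prefix_.toList.length,
        97 ≤ (w.toList.getD i ' ').toNat ∧ (w.toList.getD i ' ').toNat ≤ 122 ∧
        ∀ j < prefix_.toList.length, j ≠ i → w.toList.getD j ' ' = prefix_.toList.getD j ' ') →
    w ∈ tree.map Prod.fst
instance (tree : List (String × Int)) (prefix_ : String) (valid_words_set : List String) (autocomplete_words : Option (List String)) : Decidable (Pre_all_single_character_replace tree prefix_ valid_words_set autocomplete_words) := by unfold Pre_all_single_character_replace; infer_instance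

def pvWitness_all_single_character_replace : (List (String × Int)) × String × List String × Option (List String) :=
  ([("ab", 1), ("bb", 2)], "ab", ["ab", "bb", "xYz"], some ["zz"])

def Spec_all_single_character_replace (tree : List (String × Int)) (prefix_ : String) (valid_words_set : List String) (autocomplete_words : Option (List String)) (out : List (String × Int)) : Prop := out = all_single_character_replace_alt tree prefix_ valid_words_set autocomplete_words
instance (tree : List (String × Int)) (prefix_ : String) (valid_words_set : List String) (autocomplete_words : Option (List String)) (out : List (String × Int)) : Decidable (Spec_all_single_character_replace tree prefix_ valid_words_set autocomplete_words out) := by unfold Spec_all_single_character_replace; infer_instance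

-- ===== CLAIM (what is proved, stated in full; the proofs are below) =====
def Claim_equal_all_single_character_replace : Prop := ∀ (tree : List (String × Int)) (prefix_ : String) (valid_words_set : List String) (autocomplete_words : Option (List String)), Dom_all_single_character_replace tree prefix_ valid_words_set autocomplete_words → Pre_all_single_character_replace tree prefix_ valid_words_set autocomplete_words → Spec_all_single_character_replace tree prefix_ valid_words_set autocomplete_words (all_single_character_replace tree prefix_ valid_words_set autocomplete_words)

-- ===== LEMMAS AND PROOFS =====

-- the single-replacement candidate of prefix at position i with letter c
def pvGen (P : List Char) (i : Nat) (c : Char) : List Char := P.take i ++ c :: P.drop (i + 1)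
-- the candidate word for (position i, alphabet letter #k)
def pvCand (P : List Char) (i k : Nat) : String := String.ofList (pvGen P i (Char.ofNat (97 + k)))
-- the output pair for word w
def pvPair (tree : List (String × Int)) (w : String) : String × Int := (w, PySem.Dict.getD (PySem.Dict.mk tree) w 0)
-- the Nat-index diff list between W and P
def pvDiffs (P W : List Char) : List Nat := (List.range P.length).filter (fun j => !(W.getD j ' ' == P.getD j ' '))
-- what one valid word w contributes to found[i] in B's classification pass
def pvContrib (prefix_ : String) (ac : List String) (w : String) (i : Nat) (c : Char) : Prop :=
  w.toList.length = prefix_.toList.length ∧ w ∉ ac ∧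
    ((w = prefix_ ∧ c = prefix_.toList.getD i ' ') ∨
     (pvDiffs prefix_.toList w.toList = [i] ∧ c = w.toList.getD i ' '))
-- the common normal form of both ports (nested (position, letter) emission)
def pvEmit (tree : List (String × Int)) (P : List Char) (valid ac : List String) : List (String × Int) :=
  (List.range P.length).foldl (fun s i =>
    (List.range 26).foldl (fun s k =>
      if pvCand P i k ∈ valid ∧ pvCand P i k ∉ ac then PySem.Set.add s (pvPair tree (pvCand P i k)) else s) s) []

lemma pvGen_length (P : List Char) (i : Nat) (c : Char) (h : i < P.length) : (pvGen P i c).length = P.length := by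
  simp [pvGen]; omega

lemma pvGen_getD (P : List Char) (i : Nat) (c : Char) (h : i < P.length) (j : Nat) (hj : j < P.length) :
    (pvGen P i c).getD j ' ' = if j = i then c else P.getD j ' ' := by
  unfold pvGen
  rcases Nat.lt_trichotomy j i with hji | rfl | hij
  · rw [if_neg (by omega)]
    rw [List.getD_eq_getElem _ _ (by simp; omega), List.getD_eq_getElem _ _ (by omega)]
    rw [List.getElem_append_left (by simp; omega)]
    simp [List.getElem_take]
  · rw [if_pos rfl]
    rw [List.getD_eq_getElem _ _ (by simp; omega)]
    rw [List.getElem_append_right (by simp)]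
    simp [Nat.min_eq_left (Nat.le_of_lt h)]
  · rw [if_neg (by omega)]
    rw [List.getD_eq_getElem _ _ (by simp; omega), List.getD_eq_getElem _ _ (by omega)]
    rw [List.getElem_append_right (by simp; omega)]
    have hlt : List.length (P.take i) = i := by simp [Nat.le_of_lt h]
    simp only [hlt]
    rw [List.getElem_cons]
    rw [dif_neg (by omega)]
    rw [List.getElem_drop]
    congr 1
    omega

lemma pvGen_self (P : List Char) (j : Nat) (hj : j < P.length) : pvGen P j (P.getD j ' ') = P := by
  apply List.ext_getElem (pvGen_length P j _ hj)
  intro k h1 h2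
  rw [← List.getD_eq_getElem _ ' ' h1, ← List.getD_eq_getElem _ ' ' h2,
    pvGen_getD P j _ hj k h2]
  by_cases hkj : k = j <;> simp [hkj]

lemma pv_filter_range_eq (n i : Nat) (h : i < n) : (List.range n).filter (fun j => j == i) = [i] := by
  induction n with
  | zero => omega
  | succ n ih =>
    rw [List.range_succ, List.filter_append]
    rcases Nat.lt_or_ge i n with hn | hn
    · rw [ih hn]
      simp; omega
    · have : i = n := by omega
      subst this
      simp [List.filter_eq_nil_iff]
      omega

lemma pv_diffs_bridge (P W : List Char) :
    ((PySem.List.pyRange 0 ((P.length : Int)) 1).filter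
      (fun i => PySem.List.pyGetD W i ' ' != PySem.List.pyGetD P i ' ')) = (pvDiffs P W).map (fun (j : Nat) => (j : Int)) := by
  rw [PySem.List.pyRange_zero_nat, List.filter_map]
  unfold pvDiffs
  have hpred : ∀ j ∈ List.range P.length,
      ((fun i => PySem.List.pyGetD W i ' ' != PySem.List.pyGetD P i ' ') ∘ (fun k : Nat => (k : Int))) j
        = (!(W.getD j ' ' == P.getD j ' ')) := by
    intro j hj
    simp [bne]
  rw [List.filter_congr hpred]

lemma pv_diffs_lt (P W : List Char) (j : Nat) (h : j ∈ pvDiffs P W) : j < P.length := by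
  unfold pvDiffs at h
  simp only [List.mem_filter, List.mem_range] at h
  exact h.1

lemma pv_diffs_refl (P : List Char) : pvDiffs P P = [] := by
  unfold pvDiffs
  simp

lemma pv_diffs_single (P W : List Char) (hl : W.length = P.length) (j : Nat) (h : pvDiffs P W = [j]) :
    j < P.length ∧ W = pvGen P j (W.getD j ' ') := by
  have hjmem : j ∈ pvDiffs P W := by simp [h]
  have hjlt : j < P.length := pv_diffs_lt P W j hjmem
  refine ⟨hjlt, ?_⟩
  apply List.ext_getElem (by rw [hl, pvGen_length _ _ _ hjlt])
  intro k h1 h2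
  have hk : k < P.length := by rwa [pvGen_length _ _ _ hjlt] at h2
  rw [← List.getD_eq_getElem W ' ' h1, ← List.getD_eq_getElem _ ' ' h2,
    pvGen_getD P j _ hjlt k hk]
  by_cases hkj : k = j
  · subst hkj; simp
  · rw [if_neg hkj]
    have : k ∉ pvDiffs P W := by simp [h, hkj]
    unfold pvDiffs at this
    simp only [List.mem_filter, List.mem_range] at this
    by_contra hne
    exact this ⟨hk, by simp; exact hne⟩

lemma pv_diffs_gen (P : List Char) (i : Nat) (c : Char) (h : i < P.length) :
    pvDiffs P (pvGen P i c) = if c = P.getD i ' ' then [] else [i] := by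
  unfold pvDiffs
  by_cases hc : c = P.getD i ' '
  · rw [if_pos hc, List.filter_eq_nil_iff]
    intro j hj
    simp only [List.mem_range] at hj
    rw [pvGen_getD P i c h j hj]
    by_cases hji : j = i
    · subst hji; simp; exact hc
    · simp [hji]
  · rw [if_neg hc, ← pv_filter_range_eq P.length i h]
    apply List.filter_congr
    intro j hj
    simp only [List.mem_range] at hj
    rw [pvGen_getD P i c h j hj]
    by_cases hji : j = i
    · subst hji; simp; exact hc
    · simp [hji]

-- the alphabet string is the chr(97+k) enumeration
lemma pv_alpha : "abcdefghijklmnopqrstuvwxyz".toList = (List.range 26).map (fun k => Char.ofNat (97 + k)) := by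
  decide

-- candidate word built by either port's slice expression
lemma pv_word (P : List Char) (i : Nat) (c : Char) :
    PySem.Chars.slice P none (some (i : Int)) ++ [c] ++ PySem.Chars.slice P (some ((i : Int) + 1)) none = pvGen P i c := by
  unfold pvGen
  rw [PySem.Chars.slice_eq_listSlice, PySem.List.slice_to_natCast,
    show ((i : Int) + 1) = ((i + 1 : Nat) : Int) by push_cast; ring,
    PySem.Chars.slice_eq_listSlice, PySem.List.slice_from_natCast]
  simp

-- ===== the A side =====
lemma pv_A_none (tree : List (String × Int)) (prefix_ : String) (valid : List String) :
    all_single_character_replace tree prefix_ valid none = [] := by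
  unfold all_single_character_replace
  rw [PySem.List.foldl_congr_mem _ _ (fun s _ => s) _ ?_]
  · rw [PySem.List.foldl_ignore]
  · intro acc i _
    rw [PySem.List.foldl_congr_mem _ _ (fun s _ => s) _ ?_]
    · rw [PySem.List.foldl_ignore]
    · intro acc' ai _
      rw [if_neg (by simp)]

lemma pv_A_some (tree : List (String × Int)) (prefix_ : String) (valid ac : List String) :
    all_single_character_replace tree prefix_ valid (some ac) = pvEmit tree prefix_.toList valid ac := by
  unfold all_single_character_replace pvEmit
  rw [PySem.Str.len_eq, PySem.List.pyRange_zero_nat, List.foldl_map]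
  apply PySem.List.foldl_congr_mem
  intro acc i hi
  dsimp only
  rw [show PySem.List.pyRange 97 123 1 = (List.range 26).map (fun (k : Nat) => (97 : Int) + k) by
    rw [PySem.List.pyRange_one, show ((123 : Int) - 97).toNat = 26 from by decide], List.foldl_map]
  apply PySem.List.foldl_congr_mem
  intro acc' k hk
  dsimp only
  have hchar : Char.ofNat ((97 : Int) + (k : Int)).toNat = Char.ofNat (97 + k) := by
    have h97 : ((97 : Int) + (k : Int)).toNat = 97 + k := by omega
    rw [h97]
  have hword : String.ofList
      (PySem.Chars.slice prefix_.toList (some 0) (some (i : Int)) ++ [Char.ofNat ((97 : Int) + (k : Int)).toNat]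
        ++ PySem.Chars.slice prefix_.toList (some ((i : Int) + 1)) none) = pvCand prefix_.toList i k := by
    unfold pvCand
    rw [hchar, PySem.Chars.slice_eq_listSlice, PySem.List.slice_zero_start, ← PySem.Chars.slice_eq_listSlice,
      pv_word]
  rw [hword]
  have hiff : (pvCand prefix_.toList i k ∈ valid ∧ (some ac : Option (List String)) ≠ none ∧
      pvCand prefix_.toList i k ∉ (some ac : Option (List String)).getD [])
      ↔ (pvCand prefix_.toList i k ∈ valid ∧ pvCand prefix_.toList i k ∉ ac) := by
    simp
  by_cases hc : pvCand prefix_.toList i k ∈ valid ∧ pvCand prefix_.toList i k ∉ ac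
  · rw [if_pos (hiff.mpr hc), if_pos hc]
    rfl
  · rw [if_neg (fun h => hc (hiff.mp h)), if_neg hc]

-- ===== the B side =====
lemma pv_foldl_set_length {α : Type} (g : List α → Int → α) (l : List Int) (fd : List α) :
    (l.foldl (fun fd i => PySem.List.pySetD fd i (g fd i)) fd).length = fd.length := by
  induction l generalizing fd with
  | nil => rfl
  | cons x rest ih => simp [ih, PySem.List.length_pySetD]

lemma pv_foldl_setNat_length {α : Type} (g : List α → Nat → α) (l : List Nat) (fd : List α) :
    (l.foldl (fun fd (i : Nat) => PySem.List.pySetD fd (i : Int) (g fd i)) fd).length = fd.length := by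
  induction l generalizing fd with
  | nil => rfl
  | cons x rest ih => rw [List.foldl_cons, ih, PySem.List.length_pySetD]

lemma pv_step_length (prefix_ : String) (ac : List String) (n : Int) (fd : List (PySem.Set Char)) (w : String) :
    (pvFoundStep prefix_ ac n fd w).length = fd.length := by
  simp only [pvFoundStep]
  split_ifs with h1 h2 h3
  · rfl
  · exact pv_foldl_set_length _ _ _
  · exact PySem.List.length_pySetD _ _ _
  · rfl

lemma pv_fold_length (prefix_ : String) (ac : List String) (n : Int) (valid : List String) (fd : List (PySem.Set Char)) :
    (valid.foldl (pvFoundStep prefix_ ac n) fd).length = fd.length := by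
  induction valid generalizing fd with
  | nil => rfl
  | cons w rest ih => simp [ih, pv_step_length]

-- the identity branch: after 'for i in range(n): found[i].add(prefix[i])'
lemma pv_idfold_getD (P : List Char) (m : Nat) (fd : List (PySem.Set Char)) (hlen : fd.length = P.length)
    (hm : m ≤ P.length) (j : Nat) (hj : j < P.length) :
    ((List.range m).foldl (fun fd (i : Nat) =>
        PySem.List.pySetD fd (i : Int) (PySem.Set.add (PySem.List.pyGetD fd (i : Int) PySem.Set.empty) (PySem.List.pyGetD P (i : Int) ' '))) fd).getD j []
      = if j < m then PySem.Set.add (fd.getD j []) (P.getD j ' ') else fd.getD j [] := by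
  induction m generalizing j with
  | zero => simp
  | succ m ih =>
    rw [List.range_succ, List.foldl_append, List.foldl_cons, List.foldl_nil]
    set fd' := (List.range m).foldl (fun fd (i : Nat) =>
        PySem.List.pySetD fd (i : Int) (PySem.Set.add (PySem.List.pyGetD fd (i : Int) PySem.Set.empty) (PySem.List.pyGetD P (i : Int) ' '))) fd with hfd'
    have hlen' : fd'.length = P.length := by
      rw [hfd', pv_foldl_setNat_length (fun fd (i : Nat) => PySem.Set.add (PySem.List.pyGetD fd (i : Int) PySem.Set.empty) (PySem.List.pyGetD P (i : Int) ' '))]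
      exact hlen
    rw [PySem.List.pySetD_natCast, List.getD_eq_getElem?_getD, List.getElem?_set]
    simp only [PySem.List.pyGetD_natCast, show (PySem.Set.empty : PySem.Set Char) = [] from rfl]
    by_cases hjm : m = j
    · subst hjm
      rw [if_pos rfl, if_pos (by omega), Option.getD_some, if_pos (by omega)]
      have hfd'm : fd'.getD m [] = fd.getD m [] := by
        rw [ih (by omega) m hj, if_neg (by omega)]
      rw [hfd'm]
    · rw [if_neg hjm, ← List.getD_eq_getElem?_getD, ih (by omega) j hj]
      by_cases h1 : j < m
      · rw [if_pos h1, if_pos (by omega)]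
      · rw [if_neg h1, if_neg (by omega)]

-- one classification step, membershipwise
lemma pv_step_getD (prefix_ : String) (ac : List String) (fd : List (PySem.Set Char)) (w : String)
    (hlen : fd.length = prefix_.toList.length) (i : Nat) (hi : i < prefix_.toList.length) (c : Char) :
    c ∈ (pvFoundStep prefix_ ac ((prefix_.toList.length : Int)) fd w).getD i []
      ↔ (c ∈ fd.getD i [] ∨ pvContrib prefix_ ac w i c) := by
  set P := prefix_.toList with hP
  simp only [pvFoundStep]
  by_cases hg : PySem.Str.len w ≠ (P.length : Int) ∨ w ∈ ac
  · rw [if_pos hg]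
    have hnc : ¬ pvContrib prefix_ ac w i c := by
      intro ⟨h1, h2, _⟩
      rcases hg with hg | hg
      · exact hg (by rw [PySem.Str.len_eq]; exact_mod_cast h1)
      · exact h2 hg
    simp [hnc]
  · rw [if_neg hg]
    push Not at hg
    obtain ⟨hglen, hgac⟩ := hg
    have hwlen : w.toList.length = P.length := by
      rw [PySem.Str.len_eq] at hglen
      exact_mod_cast hglen
    by_cases hwp : w = prefix_
    · rw [if_pos hwp]
      rw [PySem.List.pyRange_zero_nat, List.foldl_map]
      rw [pv_idfold_getD P P.length fd hlen (le_refl _) i hi, if_pos hi]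
      rw [PySem.Set.mem_add]
      unfold pvContrib
      constructor
      · rintro (h | h)
        · exact Or.inl h
        · exact Or.inr ⟨hwlen, hgac, Or.inl ⟨hwp, h⟩⟩
      · rintro (h | ⟨_, _, (⟨_, h⟩ | ⟨hd, _⟩)⟩)
        · exact Or.inl h
        · exact Or.inr h
        · exfalso
          rw [hwp, ← hP, pv_diffs_refl] at hd
          simp at hd
    · rw [if_neg hwp]
      have hbr := pv_diffs_bridge P w.toList
      rw [hbr]
      by_cases hl1 : (pvDiffs P w.toList).length = 1
      · obtain ⟨j, hj⟩ := List.length_eq_one_iff.mp hl1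
        have hjlt : j < P.length := pv_diffs_lt P w.toList j (by simp [hj])
        rw [if_pos (by simp [hj])]
        rw [hj]
        have hd0 : PySem.List.pyGetD ([j].map (fun (j : Nat) => (j : Int))) 0 0 = (j : Int) := by
          simp
        rw [hd0, PySem.List.pySetD_natCast, List.getD_eq_getElem?_getD, List.getElem?_set]
        by_cases hij : i = j
        · subst hij
          rw [if_pos rfl]
          have hin : i < fd.length := by omega
          simp only [hin, if_pos]
          rw [PySem.List.pyGetD_natCast, PySem.List.pyGetD_natCast]
          simp only [Option.getD_some]
          rw [PySem.Set.mem_add]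
          unfold pvContrib
          constructor
          · rintro (h | h)
            · exact Or.inl h
            · exact Or.inr ⟨hwlen, hgac, Or.inr ⟨hj, h⟩⟩
          · rintro (h | ⟨_, _, (⟨hwp', _⟩ | ⟨hd, hc⟩)⟩)
            · exact Or.inl h
            · exact absurd hwp' hwp
            · rw [hj] at hd
              have : i = i := rfl
              cases hd
              exact Or.inr hc
        · rw [if_neg (fun h => hij h.symm), ← List.getD_eq_getElem?_getD]
          unfold pvContrib
          constructor
          · exact Or.inl
          · rintro (h | ⟨_, _, (⟨hwp', _⟩ | ⟨hd, _⟩)⟩)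
            · exact h
            · exact absurd hwp' hwp
            · rw [hj] at hd
              cases hd
              exact absurd rfl hij
      · rw [if_neg (by simpa using hl1)]
        have hnc : ¬ pvContrib prefix_ ac w i c := by
          rintro ⟨_, _, (⟨hwp', _⟩ | ⟨hd, _⟩)⟩
          · exact hwp hwp'
          · exact hl1 (by rw [hP, hd]; rfl)
        simp [hnc]

-- full classification pass, membershipwise
lemma pv_fold_getD (prefix_ : String) (ac : List String) (valid : List String) (fd : List (PySem.Set Char))
    (hlen : fd.length = prefix_.toList.length) (i : Nat) (hi : i < prefix_.toList.length) (c : Char) :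
    c ∈ (valid.foldl (pvFoundStep prefix_ ac ((prefix_.toList.length : Int))) fd).getD i []
      ↔ (c ∈ fd.getD i [] ∨ ∃ w ∈ valid, pvContrib prefix_ ac w i c) := by
  induction valid generalizing fd with
  | nil => simp
  | cons w rest ih =>
    rw [List.foldl_cons, ih _ (by rw [pv_step_length]; exact hlen), pv_step_getD prefix_ ac fd w hlen i hi c]
    simp only [List.mem_cons]
    constructor
    · rintro ((h | h) | ⟨x, hx, hc⟩)
      · exact Or.inl h
      · exact Or.inr ⟨w, Or.inl rfl, h⟩
      · exact Or.inr ⟨x, Or.inr hx, hc⟩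
    · rintro (h | ⟨x, (rfl | hx), hc⟩)
      · exact Or.inl (Or.inl h)
      · exact Or.inl (Or.inr hc)
      · exact Or.inr ⟨x, hx, hc⟩

-- what the pass records at position i is exactly "the substituted word is valid and not suppressed"
lemma pv_contrib_iff (prefix_ : String) (ac valid : List String) (i : Nat) (hi : i < prefix_.toList.length) (c : Char) :
    (∃ w ∈ valid, pvContrib prefix_ ac w i c)
      ↔ (String.ofList (pvGen prefix_.toList i c) ∈ valid ∧ String.ofList (pvGen prefix_.toList i c) ∉ ac) := by
  set P := prefix_.toList with hP
  constructor
  · rintro ⟨w, hwv, hlen, hac, (⟨rfl, hc⟩ | ⟨hd, hc⟩)⟩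
    · rw [hc, ← hP, pvGen_self P i hi, hP, String.ofList_toList]
      exact ⟨hwv, hac⟩
    · obtain ⟨_, hw⟩ := pv_diffs_single P w.toList hlen i hd
      rw [← hc] at hw
      rw [← hw, String.ofList_toList]
      exact ⟨hwv, hac⟩
  · rintro ⟨hv, hac⟩
    refine ⟨String.ofList (pvGen P i c), hv, ?_, hac, ?_⟩
    · rw [String.toList_ofList, pvGen_length P i c hi]
    · by_cases hcp : c = P.getD i ' '
      · left
        constructor
        · rw [hcp, pvGen_self P i hi, hP, String.ofList_toList]
        · exact hcp
      · right
        rw [String.toList_ofList]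
        constructor
        · rw [pv_diffs_gen P i c hi, if_neg hcp]
        · rw [pvGen_getD P i c hi i hi, if_pos rfl]

lemma pv_getD_map_empty (l : List Int) (i : Nat) :
    ((l.map (fun _ => (PySem.Set.empty : PySem.Set Char))).getD i []) = [] := by
  rw [List.getD_eq_getElem?_getD, List.getElem?_map]
  cases l[i]? <;> rfl

lemma pv_B_some (tree : List (String × Int)) (prefix_ : String) (valid ac : List String) :
    all_single_character_replace_alt tree prefix_ valid (some ac) = pvEmit tree prefix_.toList valid ac := by
  set P := prefix_.toList with hP
  set N := P.length with hN
  show (PySem.List.enumerate (valid.foldl (pvFoundStep prefix_ ac (PySem.Str.len prefix_))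
      ((PySem.List.pyRange 0 (PySem.Str.len prefix_) 1).map (fun _ => PySem.Set.empty))) 0).foldl (fun results p =>
        "abcdefghijklmnopqrstuvwxyz".toList.foldl (fun results c =>
          if PySem.Set.contains p.2 c then
            PySem.Set.add results
              (String.ofList (PySem.Chars.slice prefix_.toList none (some p.1) ++ [c] ++ PySem.Chars.slice prefix_.toList (some (p.1 + 1)) none),
               PySem.Dict.getD (PySem.Dict.mk tree)
                 (String.ofList (PySem.Chars.slice prefix_.toList none (some p.1) ++ [c] ++ PySem.Chars.slice prefix_.toList (some (p.1 + 1)) none)) 0)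
          else results) results) PySem.Set.empty
    = pvEmit tree P valid ac
  rw [PySem.Str.len_eq, ← hP, ← hN]
  set fd0 := (PySem.List.pyRange 0 ((N : Int)) 1).map (fun _ => (PySem.Set.empty : PySem.Set Char)) with hfd0
  have hfd0len : fd0.length = N := by
    rw [hfd0, List.length_map, PySem.List.length_pyRange_one]
    omega
  set U := valid.foldl (pvFoundStep prefix_ ac ((N : Int))) fd0 with hU
  have hUlen : U.length = N := by
    rw [hU, pv_fold_length]
    exact hfd0len
  have hUmem : ∀ i < N, ∀ c : Char,
      (c ∈ U.getD i [] ↔ (String.ofList (pvGen P i c) ∈ valid ∧ String.ofList (pvGen P i c) ∉ ac)) := by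
    intro i hi c
    rw [hU, pv_fold_getD prefix_ ac valid fd0 hfd0len i hi c, hfd0, pv_getD_map_empty]
    simp only [List.not_mem_nil, false_or]
    exact pv_contrib_iff prefix_ ac valid i hi c
  rw [PySem.List.enumerate_eq_map_pyRange (d := PySem.Set.empty), PySem.List.len_eq, hUlen,
    PySem.List.pyRange_zero_nat, List.map_map, List.foldl_map]
  unfold pvEmit
  apply PySem.List.foldl_congr_mem
  intro acc i hi
  have hilt : i < N := List.mem_range.mp hi
  dsimp only [Function.comp]
  rw [pv_alpha, List.foldl_map]
  apply PySem.List.foldl_congr_mem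
  intro acc' k hk
  dsimp only
  have hword : String.ofList (PySem.Chars.slice P none (some ((i : Nat) : Int)) ++ [Char.ofNat (97 + k)]
      ++ PySem.Chars.slice P (some (((i : Nat) : Int) + 1)) none) = pvCand P i k := by
    unfold pvCand
    rw [pv_word]
  have hgetU : PySem.List.pyGetD U ((i : Nat) : Int) PySem.Set.empty = U.getD i [] := by
    rw [PySem.List.pyGetD_natCast]
    rfl
  have hcontains : (PySem.List.pyGetD U ((i : Nat) : Int) PySem.Set.empty).contains (Char.ofNat (97 + k)) = true
      ↔ (pvCand P i k ∈ valid ∧ pvCand P i k ∉ ac) := by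
    rw [hgetU, PySem.Set.contains_iff, hUmem i hilt]
    rfl
  by_cases hc : pvCand P i k ∈ valid ∧ pvCand P i k ∉ ac
  · rw [if_pos (hcontains.mpr hc), if_pos hc, hword]
    rfl
  · rw [if_neg (fun h => hc (hcontains.mp h)), if_neg hc]

-- ===== VERDICT (by name: the statement is the Claim_ definition above) =====
theorem all_single_character_replace_spec : Claim_equal_all_single_character_replace := by
  intro tree prefix_ valid aw _hDom _hPre
  unfold Spec_all_single_character_replace
  cases aw with
  | none =>
    rw [pv_A_none]
    rfl
  | some ac =>
    rw [pv_A_some, pv_B_some]
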